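-- pv_equiv track=rewrite | github.com/irenismb/stock | python/cortar y pegar catalogo-quitar productos-pagina web.py | compute_kept_removed_from_cleaned
-- ===== SOURCE A (Python) =====
-- def compute_kept_removed_from_cleaned(cleaned_inner: str):
--     lines = cleaned_inner.splitlines(True)
--
--     header_idx = None
--     for i, ln in enumerate(lines):
--         if ln.strip():
--             header_idx = i
--             break
--     if header_idx is None:
--         return cleaned_inner, ""
--
--     first_idx = None
--     for j in range(header_idx + 1, len(lines)):
--         if lines[j].strip():
--             first_idx = j
--             break
--     if first_idx is None:
--         return "".join(lines), ""
--
--     kept = "".join(lines[:first_idx + 1])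
--     removed = "".join(lines[first_idx + 1:])
--
--     if kept and not kept.endswith("\n") and not kept.endswith("\r\n"):
--         kept += "\n"
--     return kept, removed
-- ===== SOURCE B (Python) =====
-- def compute_kept_removed_from_cleaned(cleaned_inner: str):
--     # Single character-level state machine: find the char offset just past the
--     # end of the second non-blank line, then slice the original string once.
--     s = cleaned_inner
--     n = len(s)
--     i = 0
--     seen = False      # current line contains a non-space character
--     count = 0         # non-blank lines already terminated (0 or 1)
--     cut = None        # offset just past the terminator of the 2nd non-blank line
--     while i < n:
--         c = s[i]
--         if c == '\r' and i + 1 < n and s[i + 1] == '\n':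
--             i += 2
--         elif c == '\n' or c == '\r':
--             i += 1
--         else:
--             if not c.isspace():
--                 seen = True
--             i += 1
--             continue
--         # a line just ended at offset i
--         if seen:
--             if count == 1:
--                 cut = i
--                 break
--             count = 1
--         seen = False
--     if cut is None and seen and count == 1:
--         cut = n  # the final, unterminated line is the second non-blank line
--     if cut is None:
--         return cleaned_inner, ""
--     kept = s[:cut]
--     removed = s[cut:]
--     if kept and not kept.endswith("\n"):
--         kept += "\n"
--     return kept, removed
-- ===== Notes on version B (the rewrite author's own statement) =====
-- stated objective: alternative
-- what changed: Replaces A's splitlines(True) + two line-level break-loops + list-slice joins with a single character-level state machine (seen/count/offset) that computes the cut offset directly and slices the original string once; the line list is never materialised and A's redundant second suffix test is dropped.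
import Mathlib
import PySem

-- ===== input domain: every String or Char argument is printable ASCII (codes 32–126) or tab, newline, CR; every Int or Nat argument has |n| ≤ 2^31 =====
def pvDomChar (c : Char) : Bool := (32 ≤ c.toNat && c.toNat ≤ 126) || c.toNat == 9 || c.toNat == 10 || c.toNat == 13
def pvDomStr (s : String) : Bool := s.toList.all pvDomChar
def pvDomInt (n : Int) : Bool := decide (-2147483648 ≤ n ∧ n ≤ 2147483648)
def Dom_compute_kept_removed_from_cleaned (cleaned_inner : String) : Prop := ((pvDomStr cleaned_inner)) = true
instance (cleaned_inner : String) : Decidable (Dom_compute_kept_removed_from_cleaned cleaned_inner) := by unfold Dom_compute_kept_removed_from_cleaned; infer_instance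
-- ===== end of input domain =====

-- B replaces A's splitlines+two-line-scans by a single character-level state machine that
-- finds the cut offset and slices the original string once (alternative decomposition, same cost).


-- ===== PORT A =====

-- hand port of str.splitlines(True) (keepends): exact on the Dom alphabet, whose only
-- line-break characters are '\n', '\r' and the pair "\r\n" (PySem.Str.splitlines drops ends).
def pvSplitKeep (cur : List Char) : List Char → List (List Char)
  | [] => if cur = [] then [] else [cur]
  | '\r' :: '\n' :: rest => (cur ++ ['\r', '\n']) :: pvSplitKeep [] rest
  | '\n' :: rest => (cur ++ ['\n']) :: pvSplitKeep [] rest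
  | '\r' :: rest => (cur ++ ['\r']) :: pvSplitKeep [] rest
  | c :: rest => pvSplitKeep (cur ++ [c]) rest

-- truthiness of ln.strip()
def pvNonblank (ln : List Char) : Bool := !(PySem.Chars.strip ln).isEmpty

-- A's break-loop "for i, ln in enumerate(lines): if ln.strip(): … break", started at index i.
-- A's second loop "for j in range(h+1, len(lines)): if lines[j].strip(): … break" is the same
-- scan over the suffix lines[h+1:], so A's port calls pvEnumFind (h+1) (lines.drop (h+1)).
def pvEnumFind (i : Nat) : List (List Char) → Option Nat
  | [] => none
  | ln :: rest => if pvNonblank ln then some i else pvEnumFind (i + 1) rest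

def compute_kept_removed_from_cleaned (cleaned_inner : String) : String × String :=
  let lines := pvSplitKeep [] cleaned_inner.toList
  match pvEnumFind 0 lines with
  | none => (cleaned_inner, "")
  | some h =>
    match pvEnumFind (h + 1) (lines.drop (h + 1)) with
    | none => (String.ofList lines.flatten, "")
    | some f =>
      let kept := (PySem.List.slice lines none (some ((f : Int) + 1))).flatten
      let removed := (PySem.List.slice lines (some ((f : Int) + 1)) none).flatten
      let kept :=
        if !kept.isEmpty && !PySem.Chars.endswith kept ['\n']
            && !PySem.Chars.endswith kept ['\r', '\n'] then
          kept ++ ['\n']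
        else kept
      (String.ofList kept, String.ofList removed)

-- ===== PORT B =====

-- B's while loop as a recursion over the remaining characters: seen = "current line has a
-- non-space char", count = non-blank lines already terminated, pos = current offset;
-- result = the cut offset just past the end of the second non-blank line, if any.
def pvScan : List Char → Bool → Nat → Nat → Option Nat
  | [], seen, count, pos => if seen && count == 1 then some pos else none
  | '\r' :: '\n' :: rest, seen, count, pos =>
    if seen then
      (if count == 1 then some (pos + 2) else pvScan rest false 1 (pos + 2))
    else pvScan rest false count (pos + 2)
  | '\n' :: rest, seen, count, pos =>
    if seen then
      (if count == 1 then some (pos + 1) else pvScan rest false 1 (pos + 1))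
    else pvScan rest false count (pos + 1)
  | '\r' :: rest, seen, count, pos =>
    if seen then
      (if count == 1 then some (pos + 1) else pvScan rest false 1 (pos + 1))
    else pvScan rest false count (pos + 1)
  | c :: rest, seen, count, pos =>
    pvScan rest (seen || !PySem.Chars.isspace c) count (pos + 1)

def compute_kept_removed_from_cleaned_alt (cleaned_inner : String) : String × String :=
  let cs := cleaned_inner.toList
  match pvScan cs false 0 0 with
  | none => (cleaned_inner, "")
  | some cut =>
    let kept := cs.take cut
    let removed := cs.drop cut
    let kept :=
      if !kept.isEmpty && !PySem.Chars.endswith kept ['\n'] then kept ++ ['\n'] else kept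
    (String.ofList kept, String.ofList removed)

-- ===== PRECONDITION & SPEC =====
def Spec_compute_kept_removed_from_cleaned (cleaned_inner : String) (out : String × String) : Prop := out = compute_kept_removed_from_cleaned_alt cleaned_inner
instance (cleaned_inner : String) (out : String × String) : Decidable (Spec_compute_kept_removed_from_cleaned cleaned_inner out) := by unfold Spec_compute_kept_removed_from_cleaned; infer_instance

-- ===== CLAIM (what is proved, stated in full; the proofs are below) =====
def Claim_equal_compute_kept_removed_from_cleaned : Prop := ∀ (cleaned_inner : String), Dom_compute_kept_removed_from_cleaned cleaned_inner → Spec_compute_kept_removed_from_cleaned cleaned_inner (compute_kept_removed_from_cleaned cleaned_inner)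

-- ===== LEMMAS AND PROOFS =====

-- line-level views of B's character scan (proof-only helpers)
def pvG1 : List (List Char) → Nat → Option Nat
  | [], _ => none
  | ln :: rest, p => if pvNonblank ln then some (p + ln.length) else pvG1 rest (p + ln.length)

def pvG0 : List (List Char) → Nat → Option Nat
  | [], _ => none
  | ln :: rest, p => if pvNonblank ln then pvG1 rest (p + ln.length) else pvG0 rest (p + ln.length)

theorem pvSplitKeep_flatten (cur cs : List Char) : (pvSplitKeep cur cs).flatten = cur ++ cs := by
  induction cur, cs using pvSplitKeep.induct with
  | case1 => simp [pvSplitKeep]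
  | case2 cur h => simp [pvSplitKeep, h]
  | case3 cur rest ih => simp [pvSplitKeep, ih]
  | case4 cur rest ih => simp [pvSplitKeep, ih]
  | case5 cur rest h ih =>
    rw [pvSplitKeep]
    · simp [ih]
    · intro r hr; exact h r hr
  | case6 cur c rest h1 h2 h3 ih =>
    rw [pvSplitKeep]
    · simpa using ih
    · intro r hc hr; exact h1 r hc hr
    · exact h2
    · exact h3

theorem pvEnumFind_shift (lines : List (List Char)) : ∀ i,
    pvEnumFind i lines = (pvEnumFind 0 lines).map (· + i) := by
  induction lines with
  | nil => intro i; simp [pvEnumFind]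
  | cons ln rest ih =>
    intro i
    simp only [pvEnumFind]
    by_cases h : pvNonblank ln = true
    · simp [h]
    · simp only [h, if_false]
      rw [ih (i+1), ih 1]
      cases pvEnumFind 0 rest <;> simp <;> omega

theorem pvNonblank_any (xs : List Char) :
    pvNonblank xs = xs.any (fun c => !PySem.Chars.isspace c) := by
  simp only [pvNonblank, PySem.Chars.strip, PySem.Chars.rstrip, PySem.Chars.lstrip]
  rcases h : xs.any (fun c => !PySem.Chars.isspace c) with _ | _
  · simp only [List.any_eq_false] at h
    have h1 : xs.dropWhile PySem.Chars.isspace = [] := by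
      rw [List.dropWhile_eq_nil_iff]; intro x hx; simpa using h x hx
    simp [h1]
  · simp only [List.any_eq_true] at h
    obtain ⟨c, hc, hcs⟩ := h
    have h1 : xs.dropWhile PySem.Chars.isspace ≠ [] := by
      rw [Ne, List.dropWhile_eq_nil_iff]
      push Not
      exact ⟨c, hc, by simpa using hcs⟩
    have h2 : (xs.dropWhile PySem.Chars.isspace).reverse.dropWhile PySem.Chars.isspace ≠ [] := by
      rw [Ne, List.dropWhile_eq_nil_iff]
      push Not
      have hlast : ∃ c ∈ xs.dropWhile PySem.Chars.isspace, ¬ PySem.Chars.isspace c = true := by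
        cases hd : xs.dropWhile PySem.Chars.isspace with
        | nil => exact absurd hd h1
        | cons a t =>
          refine ⟨a, by simp [hd], ?_⟩
          have hhead := List.head_dropWhile_not (p := PySem.Chars.isspace) (l := xs) (by simp [hd])
          simp only [hd] at hhead
          simpa using hhead
      obtain ⟨a, ha, has⟩ := hlast
      exact ⟨a, by simpa using ha, has⟩
    simp [h2]

theorem pvNonblank_append_char (xs : List Char) (c : Char) :
    pvNonblank (xs ++ [c]) = (pvNonblank xs || !PySem.Chars.isspace c) := by
  simp [pvNonblank_any]

theorem pvScan_one (cur cs : List Char) : ∀ p,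
    pvScan cs (pvNonblank cur) 1 (p + cur.length) = pvG1 (pvSplitKeep cur cs) p := by
  have hnil : pvNonblank [] = false := by decide
  induction cur, cs using pvSplitKeep.induct with
  | case1 => intro p; simp [pvScan, pvSplitKeep, pvG1, hnil]
  | case2 cur h =>
    intro p
    simp only [pvScan, pvSplitKeep, if_neg h, pvG1]
    by_cases hn : pvNonblank cur = true <;> simp [hn, pvG1]
  | case3 cur rest ih =>
    intro p
    rw [pvSplitKeep, pvScan]
    have hln : pvNonblank (cur ++ ['\r', '\n']) = pvNonblank cur := by
      rw [show cur ++ ['\r','\n'] = (cur ++ ['\r']) ++ ['\n'] by simp,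
        pvNonblank_append_char, pvNonblank_append_char]
      simp [PySem.Chars.isspace]
    by_cases hn : pvNonblank cur = true
    · simp [pvG1, hln, hn]; omega
    · simp only [Bool.not_eq_true] at hn
      simp only [pvG1, hln, hn, Bool.false_eq_true, if_false]
      have := ih (p + (cur ++ ['\r', '\n']).length)
      simp only [hnil, List.length_nil, Nat.add_zero, Bool.false_eq_true] at this
      rw [← this]
      congr 1
      have : (cur ++ ['\r', '\n']).length = cur.length + 2 := by simp
      omega
  | case4 cur rest ih =>
    intro p
    rw [pvSplitKeep, pvScan]
    have hln : pvNonblank (cur ++ ['\n']) = pvNonblank cur := by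
      rw [pvNonblank_append_char]; simp [PySem.Chars.isspace]
    by_cases hn : pvNonblank cur = true
    · simp [pvG1, hln, hn]; omega
    · simp only [Bool.not_eq_true] at hn
      simp only [pvG1, hln, hn, Bool.false_eq_true, if_false]
      have := ih (p + (cur ++ ['\n']).length)
      simp only [hnil, List.length_nil, Nat.add_zero, Bool.false_eq_true] at this
      rw [← this]
      congr 1
      have : (cur ++ ['\n']).length = cur.length + 1 := by simp
      omega
  | case5 cur rest h ih =>
    intro p
    rw [pvSplitKeep, pvScan]
    case x_1 => intro r hr; exact h r hr
    case x_4 => intro r hr; exact h r hr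
    have hln : pvNonblank (cur ++ ['\r']) = pvNonblank cur := by
      rw [pvNonblank_append_char]; simp [PySem.Chars.isspace]
    by_cases hn : pvNonblank cur = true
    · simp [pvG1, hln, hn]; omega
    · simp only [Bool.not_eq_true] at hn
      simp only [pvG1, hln, hn, Bool.false_eq_true, if_false]
      have := ih (p + (cur ++ ['\r']).length)
      simp only [hnil, List.length_nil, Nat.add_zero, Bool.false_eq_true] at this
      rw [← this]
      congr 1
      have : (cur ++ ['\r']).length = cur.length + 1 := by simp
      omega
  | case6 cur c rest h1 h2 h3 ih =>
    intro p
    rw [pvSplitKeep, pvScan]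
    case x_1 => intro r hc hr; exact h1 r hc hr
    case x_2 => exact h2
    case x_3 => exact h3
    case x_4 => intro r hc hr; exact h1 r hc hr
    case x_5 => exact h2
    case x_6 => exact h3
    rw [← pvNonblank_append_char]
    have harg : p + cur.length + 1 = p + (cur ++ [c]).length := by
      have : (cur ++ [c]).length = cur.length + 1 := by simp
      omega
    rw [harg]
    exact ih p

theorem pvScan_zero (cur cs : List Char) : ∀ p,
    pvScan cs (pvNonblank cur) 0 (p + cur.length) = pvG0 (pvSplitKeep cur cs) p := by
  have hnil : pvNonblank [] = false := by decide
  induction cur, cs using pvSplitKeep.induct with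
  | case1 => intro p; simp [pvScan, pvSplitKeep, pvG0, hnil]
  | case2 cur h =>
    intro p
    simp only [pvScan, pvSplitKeep, if_neg h, pvG0]
    by_cases hn : pvNonblank cur = true <;> simp [hn, pvG1]
  | case3 cur rest ih =>
    intro p
    rw [pvSplitKeep, pvScan]
    have hln : pvNonblank (cur ++ ['\r', '\n']) = pvNonblank cur := by
      rw [show cur ++ ['\r','\n'] = (cur ++ ['\r']) ++ ['\n'] by simp,
        pvNonblank_append_char, pvNonblank_append_char]
      simp [PySem.Chars.isspace]
    have hlen : (cur ++ ['\r', '\n']).length = cur.length + 2 := by simp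
    by_cases hn : pvNonblank cur = true
    · simp only [pvG0, hln, hn, if_true, if_pos]
      have := pvScan_one [] rest (p + (cur ++ ['\r', '\n']).length)
      simp only [hnil, List.length_nil, Nat.add_zero] at this
      rw [← this]
      simp
      congr 1
    · simp only [Bool.not_eq_true] at hn
      simp only [pvG0, hln, hn, Bool.false_eq_true, if_false]
      have := ih (p + (cur ++ ['\r', '\n']).length)
      simp only [hnil, List.length_nil, Nat.add_zero, Bool.false_eq_true] at this
      rw [← this]
      congr 1
      omega
  | case4 cur rest ih =>
    intro p
    rw [pvSplitKeep, pvScan]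
    have hln : pvNonblank (cur ++ ['\n']) = pvNonblank cur := by
      rw [pvNonblank_append_char]; simp [PySem.Chars.isspace]
    have hlen : (cur ++ ['\n']).length = cur.length + 1 := by simp
    by_cases hn : pvNonblank cur = true
    · simp only [pvG0, hln, hn, if_true, if_pos]
      have := pvScan_one [] rest (p + (cur ++ ['\n']).length)
      simp only [hnil, List.length_nil, Nat.add_zero] at this
      rw [← this]
      simp
      congr 1
    · simp only [Bool.not_eq_true] at hn
      simp only [pvG0, hln, hn, Bool.false_eq_true, if_false]
      have := ih (p + (cur ++ ['\n']).length)
      simp only [hnil, List.length_nil, Nat.add_zero, Bool.false_eq_true] at this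
      rw [← this]
      congr 1
      omega
  | case5 cur rest h ih =>
    intro p
    rw [pvSplitKeep, pvScan]
    case x_1 => intro r hr; exact h r hr
    case x_4 => intro r hr; exact h r hr
    have hln : pvNonblank (cur ++ ['\r']) = pvNonblank cur := by
      rw [pvNonblank_append_char]; simp [PySem.Chars.isspace]
    have hlen : (cur ++ ['\r']).length = cur.length + 1 := by simp
    by_cases hn : pvNonblank cur = true
    · simp only [pvG0, hln, hn, if_true, if_pos]
      have := pvScan_one [] rest (p + (cur ++ ['\r']).length)
      simp only [hnil, List.length_nil, Nat.add_zero] at this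
      rw [← this]
      simp
      congr 1
    · simp only [Bool.not_eq_true] at hn
      simp only [pvG0, hln, hn, Bool.false_eq_true, if_false]
      have := ih (p + (cur ++ ['\r']).length)
      simp only [hnil, List.length_nil, Nat.add_zero, Bool.false_eq_true] at this
      rw [← this]
      congr 1
      omega
  | case6 cur c rest h1 h2 h3 ih =>
    intro p
    rw [pvSplitKeep, pvScan]
    case x_1 => intro r hc hr; exact h1 r hc hr
    case x_2 => exact h2
    case x_3 => exact h3
    case x_4 => intro r hc hr; exact h1 r hc hr
    case x_5 => exact h2
    case x_6 => exact h3
    rw [← pvNonblank_append_char]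
    have harg : p + cur.length + 1 = p + (cur ++ [c]).length := by
      have : (cur ++ [c]).length = cur.length + 1 := by simp
      omega
    rw [harg]
    exact ih p

theorem pvG1_eq (lines : List (List Char)) : ∀ p,
    pvG1 lines p = (pvEnumFind 0 lines).map (fun f => p + ((lines.take (f + 1)).flatten).length) := by
  induction lines with
  | nil => intro p; simp [pvG1, pvEnumFind]
  | cons ln rest ih =>
    intro p
    simp only [pvG1, pvEnumFind]
    by_cases h : pvNonblank ln = true
    · simp [h]
    · simp only [h, Bool.false_eq_true, if_false]
      rw [ih (p + ln.length), pvEnumFind_shift rest 1]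
      cases pvEnumFind 0 rest with
      | none => rfl
      | some f => simp [List.take_succ_cons]; omega

theorem pvG0_eq (lines : List (List Char)) : ∀ p,
    pvG0 lines p =
      match pvEnumFind 0 lines with
      | none => none
      | some h =>
        (pvEnumFind 0 (lines.drop (h + 1))).map
          (fun f2 => p + ((lines.take (h + 1 + f2 + 1)).flatten).length) := by
  induction lines with
  | nil => intro p; simp [pvG0, pvEnumFind]
  | cons ln rest ih =>
    intro p
    simp only [pvG0, pvEnumFind]
    by_cases h : pvNonblank ln = true
    · simp only [h, if_true]
      rw [pvG1_eq rest (p + ln.length)]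
      simp only [List.drop_succ_cons, List.drop_zero]
      cases pvEnumFind 0 rest with
      | none => rfl
      | some f2 => simp [List.take_succ_cons, Nat.add_comm, Nat.add_assoc, Nat.add_left_comm]; try omega
    · simp only [h, Bool.false_eq_true, if_false]
      rw [ih (p + ln.length), pvEnumFind_shift rest 1]
      cases hr : pvEnumFind 0 rest with
      | none => rfl
      | some h1 =>
        simp only [Option.map_some]
        have hdrop : (ln :: rest).drop (h1 + 1 + 1) = rest.drop (h1 + 1) := by simp
        rw [hdrop]
        cases pvEnumFind 0 (rest.drop (h1 + 1)) with
        | none => rfl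
        | some f2 =>
          simp only [Option.map_some, Option.some.injEq]
          rw [show h1 + 1 + 1 + f2 + 1 = (h1 + 1 + f2 + 1) + 1 from by omega, List.take_succ_cons]
          simp
          omega

theorem endswith_rn_imp (kept : List Char)
    (h : PySem.Chars.endswith kept ['\r', '\n'] = true) :
    PySem.Chars.endswith kept ['\n'] = true := by
  rw [PySem.Chars.endswith_iff] at h ⊢
  exact List.IsSuffix.trans (by simp) h

theorem endswith_and_eq (kept : List Char) :
    (!kept.isEmpty && !PySem.Chars.endswith kept ['\n']
      && !PySem.Chars.endswith kept ['\r', '\n'])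
    = (!kept.isEmpty && !PySem.Chars.endswith kept ['\n']) := by
  cases he : PySem.Chars.endswith kept ['\n'] with
  | true => simp
  | false =>
    have : PySem.Chars.endswith kept ['\r', '\n'] = false := by
      cases hrn : PySem.Chars.endswith kept ['\r', '\n'] with
      | false => rfl
      | true => simp [endswith_rn_imp kept hrn] at he
    simp [this]

theorem pv_ports_agree (s : String) :
    compute_kept_removed_from_cleaned s = compute_kept_removed_from_cleaned_alt s := by
  unfold compute_kept_removed_from_cleaned compute_kept_removed_from_cleaned_alt
  simp only []
  have hscan : pvScan s.toList false 0 0 = pvG0 (pvSplitKeep [] s.toList) 0 := by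
    have := pvScan_zero [] s.toList 0
    simpa using this
  rw [hscan, pvG0_eq]
  cases h1 : pvEnumFind 0 (pvSplitKeep [] s.toList) with
  | none => rfl
  | some h =>
    dsimp only
    rw [pvEnumFind_shift ((pvSplitKeep [] s.toList).drop (h + 1)) (h + 1)]
    cases h2 : pvEnumFind 0 ((pvSplitKeep [] s.toList).drop (h + 1)) with
    | none =>
      simp only [Option.map_none]
      rw [pvSplitKeep_flatten]
      simp
    | some f2 =>
      simp only [Option.map_some]
      have hc : ((f2 + (h + 1) : Nat) : Int) + 1 = (((f2 + (h + 1) + 1 : Nat)) : Int) := by push_cast; ring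
      rw [hc, PySem.List.slice_to_natCast, PySem.List.slice_from_natCast, endswith_and_eq]
      have hK : h + 1 + f2 + 1 = f2 + (h + 1) + 1 := by omega
      rw [hK]
      set lines := pvSplitKeep [] s.toList with hlines
      set K := f2 + (h + 1) + 1 with hKdef
      have hflat : lines.flatten = s.toList := by
        rw [hlines, pvSplitKeep_flatten]; simp
      have hsplit : (lines.take K).flatten ++ (lines.drop K).flatten = s.toList := by
        rw [← List.flatten_append, List.take_append_drop, hflat]
      have htake : s.toList.take (0 + ((lines.take K).flatten).length) = (lines.take K).flatten := by
        rw [Nat.zero_add, ← hsplit, List.take_left]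
      have hdrop : s.toList.drop (0 + ((lines.take K).flatten).length) = (lines.drop K).flatten := by
        rw [Nat.zero_add, ← hsplit, List.drop_left]
      rw [htake, hdrop]

-- ===== VERDICT (by name: the statement is the Claim_ definition above) =====
theorem compute_kept_removed_from_cleaned_spec : Claim_equal_compute_kept_removed_from_cleaned := by
  intro s _
  unfold Spec_compute_kept_removed_from_cleaned
  exact pv_ports_agree s
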